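-- pv_equiv track=rewrite | github.com/CRefice/ml-segmentation-project | unet.py | _channel_conversion_pairs
-- ===== SOURCE A (Python) =====
-- def _channel_conversion_pairs(in_channels: int, depth: int):
--     """
--     Creates a list of pairs of channel numbers, where each pair (in, out) at index i
--     represents the number of input and output channels of the i'th layer of the U-Net.
--
--     Arguments:
--     in_channels -- the amount of channels of the input given to the first layer.
--     depth -- the desired amount of convolution layers
--     """
--     out_channels = 64
--     pairs = []
--     for i in range(depth):
--         pairs.append((in_channels, out_channels))
--         in_channels = out_channels
--         out_channels *= 2
--     return pairs
-- ===== SOURCE B (Python) =====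
-- def _channel_conversion_pairs(in_channels: int, depth: int):
--     """Closed form: only the first pair depends on in_channels; pair i>0 is
--     (64*2**(i-1), 64*2**i), computed independently per index."""
--     if depth <= 0:
--         return []
--     return [(in_channels, 64)] + [(64 << i, 128 << i) for i in range(depth - 1)]
-- ===== Notes on version B (the rewrite author's own statement) =====
-- stated objective: alternative
-- what changed: Replaces A's accumulator loop threading (in_channels,out_channels) state with a stateless closed form: the first pair is (in_channels,64) and every later pair i is computed independently as (64<<i-1, 64<<i), no state carried between iterations.
import Mathlib
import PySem

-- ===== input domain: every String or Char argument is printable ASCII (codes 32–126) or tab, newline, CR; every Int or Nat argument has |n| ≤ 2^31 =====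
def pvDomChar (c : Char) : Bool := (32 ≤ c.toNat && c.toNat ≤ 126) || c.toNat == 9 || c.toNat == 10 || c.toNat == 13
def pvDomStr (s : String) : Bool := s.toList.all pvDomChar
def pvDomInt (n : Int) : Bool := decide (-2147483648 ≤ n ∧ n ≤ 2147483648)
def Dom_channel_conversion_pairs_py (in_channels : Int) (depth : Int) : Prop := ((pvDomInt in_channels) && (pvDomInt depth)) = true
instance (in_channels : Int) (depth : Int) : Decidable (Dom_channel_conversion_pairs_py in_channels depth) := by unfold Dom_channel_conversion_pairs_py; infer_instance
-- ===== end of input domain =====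

-- B replaces A's accumulator loop threading (in_channels,out_channels) with a stateless
-- closed form per index; objective: alternative decomposition.

-- ===== PORT A =====
-- state: (pairs, in_channels, out_channels)
def channel_conversion_pairs_py (in_channels : Int) (depth : Int) : List (Int × Int) :=
  let out_channels : Int := 64
  let st :=
    (PySem.List.pyRange 0 depth 1).foldl
      (fun (s : List (Int × Int) × Int × Int) _i =>
        (s.1 ++ [(s.2.1, s.2.2)], s.2.2, s.2.2 * 2))
      ([], in_channels, out_channels)
  st.1

-- ===== PORT B =====
-- '64 << i' / '128 << i' (i ≥ 0 from range) ported as 64 * 2 ^ i.toNat / 128 * 2 ^ i.toNat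
-- (exact for nonnegative shift).
def channel_conversion_pairs_py_alt (in_channels : Int) (depth : Int) : List (Int × Int) :=
  if depth ≤ 0 then []
  else
    [(in_channels, 64)] ++
      (PySem.List.pyRange 0 (depth - 1) 1).map
        (fun i => ((64 : Int) * 2 ^ i.toNat, (128 : Int) * 2 ^ i.toNat))

-- ===== PRECONDITION & SPEC =====
def Spec_channel_conversion_pairs_py (in_channels : Int) (depth : Int) (out : List (Int × Int)) : Prop := out = channel_conversion_pairs_py_alt in_channels depth
instance (in_channels : Int) (depth : Int) (out : List (Int × Int)) : Decidable (Spec_channel_conversion_pairs_py in_channels depth out) := by unfold Spec_channel_conversion_pairs_py; infer_instance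

-- ===== CLAIM =====
def Claim_equal_channel_conversion_pairs_py : Prop := ∀ (in_channels : Int) (depth : Int), Dom_channel_conversion_pairs_py in_channels depth → Spec_channel_conversion_pairs_py in_channels depth (channel_conversion_pairs_py in_channels depth)

-- ===== LEMMAS AND PROOFS =====

-- closed-form description of A's loop output, still threading the state
def pvPairs (ic oc : Int) : Nat → List (Int × Int)
  | 0 => []
  | n + 1 => (ic, oc) :: pvPairs oc (oc * 2) n

theorem pvLoop_eq (l : List Int) : ∀ (pairs : List (Int × Int)) (ic oc : Int),
    ((l.foldl
      (fun (s : List (Int × Int) × Int × Int) _i =>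
        (s.1 ++ [(s.2.1, s.2.2)], s.2.2, s.2.2 * 2))
      (pairs, ic, oc)).1)
    = pairs ++ pvPairs ic oc l.length := by
  induction l with
  | nil => simp [pvPairs]
  | cons x xs ih =>
    intro pairs ic oc
    simp only [List.foldl_cons, List.length_cons, pvPairs]
    rw [ih]
    simp

theorem pvPairs_closed : ∀ (n : Nat) (ic oc : Int),
    pvPairs ic oc (n + 1)
      = (ic, oc) :: (List.range n).map (fun k => (oc * 2 ^ k, oc * 2 * 2 ^ k)) := by
  intro n
  induction n with
  | zero => intro ic oc; simp [pvPairs]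
  | succ n ih =>
    intro ic oc
    show (ic, oc) :: pvPairs oc (oc * 2) (n + 1) = _
    rw [ih, List.range_succ_eq_map]
    simp only [List.map_cons, List.map_map, pow_zero, mul_one, List.cons.injEq, true_and]
    refine List.map_congr_left ?_
    intro k _
    simp only [Function.comp_apply, pow_succ, Prod.mk.injEq]
    constructor <;> ring

-- ===== VERDICT =====
theorem channel_conversion_pairs_py_spec : Claim_equal_channel_conversion_pairs_py := by
  intro ic depth _
  show _ = _
  unfold channel_conversion_pairs_py channel_conversion_pairs_py_alt
  simp only []
  rw [pvLoop_eq, PySem.List.length_pyRange_one]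
  by_cases h : depth ≤ 0
  · have h0 : (depth - 0).toNat = 0 := by omega
    rw [h0, if_pos h]
    rfl
  · have hn : (depth - 0).toNat = ((depth - 1 - 0).toNat) + 1 := by omega
    rw [hn, pvPairs_closed, PySem.List.pyRange_one]
    simp only [if_neg h, List.map_map, List.singleton_append, List.nil_append,
      List.cons.injEq, true_and]
    refine List.map_congr_left ?_
    intro k _
    simp only [Function.comp_apply, zero_add, Int.toNat_natCast, Prod.mk.injEq]
    norm_num
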